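-- pv_equiv track=rewrite | github.com/KornelJahn/advent-of-code-2023 | src/aoc2023/day05.py | map_intervals
-- ===== SOURCE A (Python) =====
-- def map_value(breakpoints, n):
--     for i, j in reversed(breakpoints.items()):
--         if n >= i:
--             return j + (n - i)
--
-- def map_intervals(breakpoints, intervals):
--     input_intervals = []
--     for a, b in intervals:
--         new_bpts = (
--             [a] +
--             [x for x in breakpoints.keys() if x > a and x < b] +
--             [b]
--         )
--         input_intervals += [(c, d-1) for c, d in zip(new_bpts, new_bpts[1:])]
--     output_intervals = [
--         (map_value(breakpoints, c), map_value(breakpoints, d))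
--         for c, d in input_intervals
--     ]
--     return output_intervals
-- ===== SOURCE B (Python) =====
-- def _bisect_right(keys, n):
--     lo, hi = 0, len(keys)
--     while lo < hi:
--         mid = (lo + hi) // 2
--         if keys[mid] <= n:
--             lo = mid + 1
--         else:
--             hi = mid
--     return lo
--
-- def map_intervals(breakpoints, intervals):
--     # A breakpoint applies to every value from its key upward until overridden
--     # by a later one, so the items collapse into a monotonic stack of segments
--     # with increasing keys; each endpoint is then mapped by one binary search.
--     stack = []
--     for k, v in breakpoints.items():
--         while stack and stack[-1][0] >= k:
--             stack.pop()
--         stack.append((k, v))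
--     keys = [k for k, _ in stack]
--
--     def lookup(n):
--         t = _bisect_right(keys, n)
--         if t == 0:
--             return None
--         k, v = stack[t - 1]
--         return v + (n - k)
--
--     out = []
--     for a, b in intervals:
--         bpts = [a] + [x for x in breakpoints if a < x < b] + [b]
--         for c, d in zip(bpts, bpts[1:]):
--             out.append((lookup(c), lookup(d - 1)))
--     return out
-- ===== Notes on version B (the rewrite author's own statement) =====
-- stated objective: alternative
-- what changed: B collapses the breakpoint items once into a monotonic stack of segments with strictly increasing keys (a later breakpoint overrides earlier ones from its key upward) and maps every interval endpoint by one binary search over that stack, replacing map_value's linear scan of the whole dict per endpoint.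
import Mathlib
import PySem

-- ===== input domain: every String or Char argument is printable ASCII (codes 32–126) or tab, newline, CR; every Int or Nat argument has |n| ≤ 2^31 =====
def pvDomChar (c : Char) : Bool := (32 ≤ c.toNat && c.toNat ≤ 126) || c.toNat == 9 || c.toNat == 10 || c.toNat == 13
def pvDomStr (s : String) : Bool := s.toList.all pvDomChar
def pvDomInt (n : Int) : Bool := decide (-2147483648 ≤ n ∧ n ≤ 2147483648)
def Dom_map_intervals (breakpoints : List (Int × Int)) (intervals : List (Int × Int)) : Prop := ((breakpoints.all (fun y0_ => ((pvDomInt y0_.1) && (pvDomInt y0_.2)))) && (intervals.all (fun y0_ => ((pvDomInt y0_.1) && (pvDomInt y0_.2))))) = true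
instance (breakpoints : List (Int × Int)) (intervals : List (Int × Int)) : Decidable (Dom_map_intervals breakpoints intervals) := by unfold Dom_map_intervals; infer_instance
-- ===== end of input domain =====

-- B replaces A's per-endpoint linear scan of the dict by a monotonic-stack index queried by binary search; the return values are proved equal on all inputs.

-- ===== PORT A =====
-- map_value: 'for i, j in reversed(breakpoints.items()): if n >= i: return j + (n - i)'
-- (first match of a scan with early return = List.find? over the reversed items)
def pvMapValue (items : List (Int × Int)) (n : Int) : Option Int :=
  (items.reverse.find? (fun p => decide (n ≥ p.1))).map (fun p => p.2 + (n - p.1))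

-- the Python dict argument is modelled as PySem.Dict.ofList of the association list
def map_intervals (breakpoints : List (Int × Int)) (intervals : List (Int × Int)) : List (Option Int × Option Int) :=
  let d := PySem.Dict.ofList breakpoints
  let input_intervals := intervals.foldl (fun acc ab =>
      let newBpts := [ab.1] ++ d.keys.filter (fun x => decide (x > ab.1) && decide (x < ab.2)) ++ [ab.2]
      acc ++ (newBpts.zip newBpts.tail).map (fun cd => (cd.1, cd.2 - 1))) []
  input_intervals.map (fun cd => (pvMapValue d.items cd.1, pvMapValue d.items cd.2))

-- ===== PORT B =====
-- hand-written binary search of Source B (_bisect_right): the list index keys[mid] is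
-- exact via getD since 0 ≤ lo ≤ mid < hi ≤ len keys throughout
def pvBisect (skeys : List Int) (n lo hi : Int) : Int :=
  if h : lo < hi then
    let mid := PySem.Int.floordiv (lo + hi) 2
    if skeys.getD mid.toNat 0 ≤ n then pvBisect skeys n (mid + 1) hi
    else pvBisect skeys n lo mid
  else lo
termination_by (hi - lo).toNat
decreasing_by
  · have := PySem.Int.floordiv_two_mid_bounds (le_of_lt h)
    have hm : PySem.Int.floordiv (lo + hi) 2 < hi := by
      rw [PySem.Int.floordiv_lt_iff_lt_mul (by norm_num)]; omega
    omega
  · have := PySem.Int.floordiv_two_mid_bounds (le_of_lt h)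
    have hm : PySem.Int.floordiv (lo + hi) 2 < hi := by
      rw [PySem.Int.floordiv_lt_iff_lt_mul (by norm_num)]; omega
    omega

-- the stack loop of Source B ('while stack and stack[-1][0] >= k: stack.pop(); stack.append((k, v))'),
-- with the Python list transcribed top-first (so append/pop act on the head) and reversed once at the end
def pvPushRev (k v : Int) : List (Int × Int) → List (Int × Int)
  | [] => [(k, v)]
  | (k0, v0) :: rest => if k0 ≥ k then pvPushRev k v rest else (k, v) :: (k0, v0) :: rest

-- lookup of Source B
def pvLookup (keys : List Int) (stack : List (Int × Int)) (n : Int) : Option Int :=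
  let t := pvBisect keys n 0 (keys.length : Int)
  if t = 0 then none
  else
    let kv := PySem.List.pyGetD stack (t - 1) (0, 0)
    some (kv.2 + (n - kv.1))

def map_intervals_alt (breakpoints : List (Int × Int)) (intervals : List (Int × Int)) : List (Option Int × Option Int) :=
  let d := PySem.Dict.ofList breakpoints
  let stack := (d.items.foldl (fun s p => pvPushRev p.1 p.2 s) []).reverse
  let keys := stack.map (fun p => p.1)
  intervals.foldl (fun out ab =>
      let bpts := [ab.1] ++ d.keys.filter (fun x => decide (ab.1 < x) && decide (x < ab.2)) ++ [ab.2]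
      out ++ (bpts.zip bpts.tail).map
        (fun cd => (pvLookup keys stack cd.1, pvLookup keys stack (cd.2 - 1)))) []

-- ===== PRECONDITION & SPEC =====
def Spec_map_intervals (breakpoints : List (Int × Int)) (intervals : List (Int × Int)) (out : List (Option Int × Option Int)) : Prop := out = map_intervals_alt breakpoints intervals
instance (breakpoints : List (Int × Int)) (intervals : List (Int × Int)) (out : List (Option Int × Option Int)) : Decidable (Spec_map_intervals breakpoints intervals out) := by unfold Spec_map_intervals; infer_instance

-- ===== CLAIM (what is proved, stated in full; the proofs are below) =====
def Claim_equal_map_intervals : Prop := ∀ (breakpoints : List (Int × Int)) (intervals : List (Int × Int)), Dom_map_intervals breakpoints intervals → Spec_map_intervals breakpoints intervals (map_intervals breakpoints intervals)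

-- ===== LEMMAS AND PROOFS =====

-- `for … in reversed(l): if p: return` = last match of l
theorem pvFind?_eq_head?_filter {a : Type} (p : a → Bool) : ∀ (l : List a), l.find? p = (l.filter p).head?
  | [] => rfl
  | x :: xs => by
    by_cases h : p x
    · rw [List.find?_cons_of_pos h, List.filter_cons_of_pos h, List.head?_cons]
    · rw [List.find?_cons_of_neg h, List.filter_cons_of_neg h, pvFind?_eq_head?_filter p xs]

theorem pvMapValue_eq_getLast? (items : List (Int × Int)) (n : Int) :
    pvMapValue items n
      = ((items.filter (fun y => decide (y.1 ≤ n))).getLast?).map (fun y => y.2 + (n - y.1)) := by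
  unfold pvMapValue
  rw [pvFind?_eq_head?_filter, List.filter_reverse, List.head?_reverse]

-- one push step keeps the head of the filtered rev-stack: a popped entry has key ≥ k,
-- so it can never be the first (latest) entry with key ≤ n once (k, v) sits above it
theorem pvPushRev_filter_head? (k v n : Int) : ∀ (s : List (Int × Int)),
    ((pvPushRev k v s).filter (fun y => decide (y.1 ≤ n))).head?
      = (((k, v) :: s).filter (fun y => decide (y.1 ≤ n))).head?
  | [] => rfl
  | (k0, v0) :: rest => by
    unfold pvPushRev
    split_ifs with h
    · rw [pvPushRev_filter_head? k v n rest]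
      by_cases hn : k ≤ n
      · rw [List.filter_cons_of_pos (by simpa using hn), List.filter_cons_of_pos (by simpa using hn)]
        simp
      · have hk0 : ¬ k0 ≤ n := by omega
        rw [List.filter_cons_of_neg (by simpa using hn), List.filter_cons_of_neg (by simpa using hn),
          List.filter_cons_of_neg (by simpa using hk0)]
    · rfl

-- the whole stack loop: the latest entry with key ≤ n on the final rev-stack is the
-- latest such entry of the item list (read back-to-front), for every n
theorem pvFold_filter_head? (n : Int) : ∀ (l : List (Int × Int)) (s : List (Int × Int)),
    ((l.foldl (fun s p => pvPushRev p.1 p.2 s) s).filter (fun y => decide (y.1 ≤ n))).head?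
      = ((l.reverse ++ s).filter (fun y => decide (y.1 ≤ n))).head?
  | [], s => by simp
  | x :: l, s => by
    rw [List.foldl_cons, pvFold_filter_head? n l (pvPushRev x.1 x.2 s)]
    rw [List.reverse_cons, List.append_assoc, List.filter_append, List.filter_append,
      List.head?_append, List.head?_append]
    have : ((pvPushRev x.1 x.2 s).filter (fun y => decide (y.1 ≤ n))).head?
        = (([x] ++ s).filter (fun y => decide (y.1 ≤ n))).head? := by
      have := pvPushRev_filter_head? x.1 x.2 n s
      simpa using this
    rw [this]

-- the rev-stack stays strictly decreasing in key, and every entry key is ≤ the pushed key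
theorem pvPushRev_sorted (k v : Int) : ∀ (s : List (Int × Int)),
    s.Pairwise (fun a b => b.1 < a.1) →
    (pvPushRev k v s).Pairwise (fun a b => b.1 < a.1) ∧ ∀ y ∈ pvPushRev k v s, y.1 ≤ k
  | [], _ => by simp [pvPushRev]
  | (k0, v0) :: rest, hp => by
    obtain ⟨h1, h2⟩ := List.pairwise_cons.mp hp
    unfold pvPushRev
    split_ifs with h
    · exact pvPushRev_sorted k v rest h2
    · push_neg at h
      refine ⟨List.pairwise_cons.mpr ⟨?_, hp⟩, ?_⟩
      · intro y hy
        rcases List.mem_cons.mp hy with rfl | hy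
        · simpa using h
        · have := h1 y hy
          simp only at this ⊢
          omega
      · intro y hy
        rcases List.mem_cons.mp hy with rfl | hy
        · simp
        · rcases List.mem_cons.mp hy with rfl | hy
          · simp only; omega
          · have := h1 y hy
            simp only at this ⊢
            omega

theorem pvFold_sorted : ∀ (l : List (Int × Int)) (s : List (Int × Int)),
    s.Pairwise (fun a b => b.1 < a.1) →
    (l.foldl (fun s p => pvPushRev p.1 p.2 s) s).Pairwise (fun a b => b.1 < a.1)
  | [], s, hs => hs
  | x :: l, s, hs => pvFold_sorted l _ (pvPushRev_sorted x.1 x.2 s hs).1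

-- countP of a prefix-closed predicate given a split index
theorem pvCountP_of_boundary {a : Type} (p : a → Bool) (l : List a) (c : Nat) (hc : c ≤ l.length)
    (h1 : ∀ (j : Nat) (hj : j < l.length), j < c → p l[j] = true)
    (h2 : ∀ (j : Nat) (hj : j < l.length), c ≤ j → p l[j] = false) :
    l.countP p = c := by
  have hsplit : l = l.take c ++ l.drop c := (List.take_append_drop c l).symm
  rw [hsplit, List.countP_append]
  have htake : (l.take c).countP p = c := by
    have : ∀ y ∈ l.take c, p y = true := by
      intro y hy
      obtain ⟨j, hj, hyv⟩ := List.mem_take_iff_getElem.mp hy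
      have hj1 : j < l.length := lt_of_lt_of_le hj (min_le_right _ _)
      have hj2 : j < c := lt_of_lt_of_le hj (min_le_left _ _)
      exact hyv ▸ h1 j hj1 hj2
    rw [List.countP_eq_length.mpr this, List.length_take]
    omega
  have hdrop : (l.drop c).countP p = 0 := by
    refine List.countP_eq_zero.mpr ?_
    intro y hy
    obtain ⟨j, hj, hyv⟩ := List.mem_drop_iff_getElem.mp hy
    have := h2 (c + j) (by omega) (by omega)
    rw [hyv] at this
    simp [this]
  omega

theorem pvBisect_eq_countP (skeys : List Int) (n : Int)
    (hs : skeys.Pairwise (· ≤ ·)) :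
    ∀ (lo hi : Int), 0 ≤ lo → lo ≤ hi → hi ≤ (skeys.length : Int) →
    (∀ (j : Nat) (hj : j < skeys.length), (j : Int) < lo → skeys[j] ≤ n) →
    (∀ (j : Nat) (hj : j < skeys.length), hi ≤ (j : Int) → n < skeys[j]) →
    pvBisect skeys n lo hi = ((skeys.countP (fun k => decide (k ≤ n)) : Nat) : Int) := by
  have hmono := List.pairwise_iff_getElem.mp hs
  intro lo hi
  induction lo, hi using pvBisect.induct skeys n with
  | case1 lo hi hlt mid hmid ih =>
    intro h0 hle hhi inv1 inv2
    rw [pvBisect]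
    simp only [dif_pos hlt]
    have hb := PySem.Int.floordiv_two_mid_bounds (le_of_lt hlt)
    have hmlt : PySem.Int.floordiv (lo + hi) 2 < hi := by
      rw [PySem.Int.floordiv_lt_iff_lt_mul (by norm_num)]; omega
    have hmn : mid.toNat < skeys.length := by simp only [mid] at *; omega
    have hmeq : (mid.toNat : Int) = mid := Int.toNat_of_nonneg (by simp only [mid]; omega)
    have hgd : skeys.getD mid.toNat 0 = skeys[mid.toNat] := by
      rw [List.getD_eq_getElem?_getD, List.getElem?_eq_getElem hmn]; rfl
    have hmid' : skeys.getD (PySem.Int.floordiv (lo + hi) 2).toNat 0 ≤ n := hmid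
    have hmid2 : skeys[mid.toNat] ≤ n := by rw [← hgd]; exact hmid
    rw [if_pos hmid']
    refine ih ?_ ?_ hhi ?_ inv2
    · simp only [mid] at *; omega
    · simp only [mid] at *; omega
    · intro j hj hjlt
      rcases Nat.lt_or_ge j mid.toNat with h | h
      · exact le_trans (hmono j mid.toNat hj hmn h) hmid2
      · have : mid.toNat = j := by omega
        subst this
        exact hmid2
  | case2 lo hi hlt mid hmid ih =>
    intro h0 hle hhi inv1 inv2
    rw [pvBisect]
    simp only [dif_pos hlt]
    have hb := PySem.Int.floordiv_two_mid_bounds (le_of_lt hlt)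
    have hmlt : PySem.Int.floordiv (lo + hi) 2 < hi := by
      rw [PySem.Int.floordiv_lt_iff_lt_mul (by norm_num)]; omega
    have hmn : mid.toNat < skeys.length := by simp only [mid] at *; omega
    have hmeq : (mid.toNat : Int) = mid := Int.toNat_of_nonneg (by simp only [mid]; omega)
    have hgd : skeys.getD mid.toNat 0 = skeys[mid.toNat] := by
      rw [List.getD_eq_getElem?_getD, List.getElem?_eq_getElem hmn]; rfl
    have hmid' : ¬ skeys.getD (PySem.Int.floordiv (lo + hi) 2).toNat 0 ≤ n := hmid
    have hmid2 : ¬ skeys[mid.toNat] ≤ n := by rw [← hgd]; exact hmid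
    rw [if_neg hmid']
    refine ih h0 ?_ ?_ inv1 ?_
    · simp only [mid] at *; omega
    · simp only [mid] at *; omega
    · intro j hj hjge
      have hmidj : skeys[mid.toNat] ≤ skeys[j] := by
        rcases Nat.lt_or_ge mid.toNat j with h | h
        · exact hmono mid.toNat j hmn hj h
        · have : mid.toNat = j := by omega
          subst this
          exact le_rfl
      omega
  | case3 lo hi hlt =>
    intro h0 hle hhi inv1 inv2
    rw [pvBisect]
    simp only [dif_neg hlt]
    have heq : lo = hi := le_antisymm hle (by omega)
    have hcnt : skeys.countP (fun k => decide (k ≤ n)) = lo.toNat := by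
      refine pvCountP_of_boundary _ _ lo.toNat (by omega) ?_ ?_
      · intro j hj hjlt
        simp only [decide_eq_true_eq]
        exact inv1 j hj (by omega)
      · intro j hj hjge
        have := inv2 j hj (by omega)
        simp only [decide_eq_false_iff_not]
        omega
    rw [hcnt]; omega

-- in a list sorted for p-monotonicity, the p-elements are exactly the countP-prefix
theorem pvFilter_eq_take_countP {a : Type} (p : a → Bool) : ∀ (l : List a),
    List.Pairwise (fun x y => p y = true → p x = true) l →
    l.filter p = l.take (l.countP p)
  | [], _ => rfl
  | x :: xs, hp => by
    obtain ⟨h1, h2⟩ := List.pairwise_cons.mp hp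
    by_cases hx : p x
    · rw [List.countP_cons_of_pos hx, List.filter_cons_of_pos hx,
        List.take_succ_cons, pvFilter_eq_take_countP p xs h2]
    · have hz : xs.countP p = 0 := List.countP_eq_zero.mpr (fun c hc hpc => hx (h1 c hc hpc))
      rw [List.countP_cons_of_neg (by simpa using hx), List.filter_cons_of_neg (by simpa using hx), hz]
      simp [List.filter_eq_nil_iff.mpr (fun c hc hpc => hx (h1 c hc hpc))]

-- B's binary-search lookup on a key-sorted stack returns the greatest entry with key ≤ n
theorem pvLookup_sorted (stack : List (Int × Int)) (n : Int)
    (hs : stack.Pairwise (fun a b => a.1 < b.1)) :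
    pvLookup (stack.map (fun p => p.1)) stack n
      = ((stack.filter (fun y => decide (y.1 ≤ n))).getLast?).map (fun y => y.2 + (n - y.1)) := by
  have hskeys : (stack.map (fun p => p.1)).Pairwise (· ≤ ·) :=
    List.pairwise_map.mpr (hs.imp (by intro a b h; omega))
  have hbis : pvBisect (stack.map (fun p => p.1)) n 0 (((stack.map (fun p => p.1)).length : Nat) : Int)
      = ((stack.countP (fun y => decide (y.1 ≤ n)) : Nat) : Int) := by
    rw [pvBisect_eq_countP _ n hskeys 0 _ le_rfl (by positivity) le_rfl
      (fun j hj hjlt => absurd hjlt (by omega))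
      (fun j hj hjge => absurd hjge (by omega))]
    rw [List.countP_map]
    rfl
  set p : Int × Int → Bool := fun y => decide (y.1 ≤ n) with hp
  set c := stack.countP p with hc
  have hcle : c ≤ stack.length := List.countP_le_length
  have hmono : stack.Pairwise (fun x y => p y = true → p x = true) := by
    refine hs.imp ?_
    intro a b hab hpb
    simp only [hp, decide_eq_true_eq] at hpb ⊢
    omega
  have htake : stack.filter p = stack.take c := pvFilter_eq_take_countP p stack hmono
  rw [pvLookup, hbis, htake]
  by_cases hzero : c = 0
  · rw [if_pos (by rw [hzero]; rfl), hzero]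
    simp
  · rw [if_neg (by simpa using hzero)]
    have hlen : c - 1 < stack.length := by omega
    have hcast : ((c : Nat) : Int) - 1 = (((c - 1 : Nat) : Nat) : Int) := by omega
    rw [hcast, PySem.List.pyGetD_natCast, List.getD_eq_getElem?_getD,
      List.getElem?_eq_getElem hlen]
    have hlast : (stack.take c).getLast? = some stack[c - 1] := by
      rw [List.getLast?_eq_getElem?, List.length_take]
      have hmin : min c stack.length = c := by omega
      rw [hmin, List.getElem?_take_of_lt (by omega), List.getElem?_eq_getElem hlen]
    rw [hlast]
    rfl

-- the central fact: B's stack lookup computes A's reversed linear scan on every n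
theorem pvLookup_eq_pvMapValue (items : List (Int × Int)) (n : Int) :
    pvLookup (((items.foldl (fun s p => pvPushRev p.1 p.2 s) []).reverse).map (fun p => p.1))
        ((items.foldl (fun s p => pvPushRev p.1 p.2 s) []).reverse) n
      = pvMapValue items n := by
  set stack := (items.foldl (fun s p => pvPushRev p.1 p.2 s) []).reverse with hstack
  have hsorted : stack.Pairwise (fun a b => a.1 < b.1) := by
    rw [hstack, List.pairwise_reverse]
    exact (pvFold_sorted items [] (by simp)).imp (by intro a b h; exact h)
  rw [pvLookup_sorted stack n hsorted, pvMapValue_eq_getLast?]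
  have hfilt : (stack.filter (fun y => decide (y.1 ≤ n))).getLast?
      = ((items.filter (fun y => decide (y.1 ≤ n))).getLast?) := by
    rw [← List.head?_reverse, ← List.filter_reverse, hstack, List.reverse_reverse]
    rw [pvFold_filter_head? n items []]
    rw [List.append_nil, List.filter_reverse, List.head?_reverse]
  rw [hfilt]

-- ===== VERDICT (by name: the statement is the Claim_ definition above) =====
theorem map_intervals_spec : Claim_equal_map_intervals := by
  unfold Claim_equal_map_intervals
  intro breakpoints intervals _dom
  unfold Spec_map_intervals map_intervals map_intervals_alt
  simp only []
  have haux : ∀ (m : Int),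
      pvLookup ((((PySem.Dict.ofList breakpoints).items.foldl (fun s p => pvPushRev p.1 p.2 s) []).reverse).map (fun p => p.1))
          (((PySem.Dict.ofList breakpoints).items.foldl (fun s p => pvPushRev p.1 p.2 s) []).reverse) m
        = pvMapValue (PySem.Dict.ofList breakpoints).items m :=
    fun m => pvLookup_eq_pvMapValue _ m
  simp only [haux, PySem.List.foldl_append_eq_flatMap, List.nil_append, List.map_flatMap,
    List.map_map]
  rfl
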